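-- pv_equiv track=rewrite | github.com/sheydHD/christmass_game | main2.py | update_fog_of_war_ephemeral
-- ===== SOURCE A (Python) =====
-- GRID_WIDTH = 48
--
-- GRID_HEIGHT = 27
--
-- TILE_SIZE = 32
--
-- def update_fog_of_war_ephemeral(px, py, radius=5):
--     tile_x = int(px//TILE_SIZE)
--     tile_y = int(py//TILE_SIZE)
--     ephemeral = [[False for _ in range(GRID_WIDTH)] for _ in range(GRID_HEIGHT)]
--     for yy in range(tile_y-radius, tile_y+radius+1):
--         for xx in range(tile_x-radius, tile_x+radius+1):
--             if 0 <= xx < GRID_WIDTH and 0 <= yy < GRID_HEIGHT: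
--                 dist_sq = (xx - tile_x)**2 + (yy - tile_y)**2
--                 if dist_sq <= radius**2:
--                     ephemeral[yy][xx] = True
--     return ephemeral
-- ===== SOURCE B (Python) =====
-- GRID_WIDTH = 48
--
-- GRID_HEIGHT = 27
--
-- TILE_SIZE = 32
--
-- def update_fog_of_war_ephemeral(px, py, radius=5):
--     tile_x = px // TILE_SIZE
--     tile_y = py // TILE_SIZE
--     if radius < 0:  # a negative radius gives no visibility
--         return [[False] * GRID_WIDTH for _ in range(GRID_HEIGHT)]
--     r_sq = radius * radius
--     return [[(x - tile_x) ** 2 + (y - tile_y) ** 2 <= r_sq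
--              for x in range(GRID_WIDTH)]
--             for y in range(GRID_HEIGHT)]
-- ===== Notes on version B (the rewrite author's own statement) =====
-- stated objective: simpler
-- what changed: Replaces A's allocate-all-False-then-mark-every-cell-of-the-(2r+1)^2-bounding-box scan with a single full-grid comprehension evaluating the distance predicate per cell, so cost no longer grows with the radius (negative radius short-circuits to the all-False grid).
import Mathlib
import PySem

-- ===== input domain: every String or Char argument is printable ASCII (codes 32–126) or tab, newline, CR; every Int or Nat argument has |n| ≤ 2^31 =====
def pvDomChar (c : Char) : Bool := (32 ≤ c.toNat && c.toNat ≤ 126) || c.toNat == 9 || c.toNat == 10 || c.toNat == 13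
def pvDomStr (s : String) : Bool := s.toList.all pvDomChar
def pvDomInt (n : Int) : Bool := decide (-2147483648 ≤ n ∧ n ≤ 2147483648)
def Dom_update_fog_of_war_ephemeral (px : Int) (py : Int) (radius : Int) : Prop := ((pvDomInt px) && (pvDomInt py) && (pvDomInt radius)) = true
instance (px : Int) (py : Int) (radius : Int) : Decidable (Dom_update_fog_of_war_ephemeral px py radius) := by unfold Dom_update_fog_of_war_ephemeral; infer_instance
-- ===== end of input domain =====

-- B replaces A's allocate-then-mark-within-a-bounding-box scan with one full-grid
-- comprehension evaluating the distance predicate per cell (simpler decomposition).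


-- ===== PORT A =====
-- one body step of A's marking loops: the in-grid check, the distance check, the assignment
def pvMark (tx ty radius : Int) (yy : Int) (g : List (List Bool)) (xx : Int) : List (List Bool) :=
  if 0 ≤ xx ∧ xx < 48 ∧ 0 ≤ yy ∧ yy < 27 then
    if (xx - tx) ^ 2 + (yy - ty) ^ 2 ≤ radius ^ 2 then
      g.modify yy.toNat (fun row => row.set xx.toNat true)
    else g
  else g

def update_fog_of_war_ephemeral (px : Int) (py : Int) (radius : Int) : List (List Bool) :=
  let tile_x := PySem.Int.floordiv px 32
  let tile_y := PySem.Int.floordiv py 32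
  let ephemeral := (List.range 27).map (fun _ => (List.range 48).map (fun _ => false))
  (PySem.List.pyRange (tile_y - radius) (tile_y + radius + 1) 1).foldl
    (fun g yy =>
      (PySem.List.pyRange (tile_x - radius) (tile_x + radius + 1) 1).foldl
        (pvMark tile_x tile_y radius yy) g)
    ephemeral

-- ===== PORT B =====
def update_fog_of_war_ephemeral_alt (px : Int) (py : Int) (radius : Int) : List (List Bool) :=
  let tile_x := PySem.Int.floordiv px 32
  let tile_y := PySem.Int.floordiv py 32
  if radius < 0 then (List.range 27).map (fun _ => List.replicate 48 false)
  else
    let r_sq := radius * radius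
    (PySem.List.pyRange 0 27 1).map (fun y =>
      (PySem.List.pyRange 0 48 1).map (fun x =>
        decide ((x - tile_x) ^ 2 + (y - tile_y) ^ 2 ≤ r_sq)))

-- ===== PRECONDITION & SPEC =====
def Spec_update_fog_of_war_ephemeral (px : Int) (py : Int) (radius : Int) (out : List (List Bool)) : Prop := out = update_fog_of_war_ephemeral_alt px py radius
instance (px : Int) (py : Int) (radius : Int) (out : List (List Bool)) : Decidable (Spec_update_fog_of_war_ephemeral px py radius out) := by unfold Spec_update_fog_of_war_ephemeral; infer_instance

-- ===== CLAIM (what is proved, stated in full; the proofs are below) =====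
def Claim_equal_update_fog_of_war_ephemeral : Prop := ∀ (px : Int) (py : Int) (radius : Int), Dom_update_fog_of_war_ephemeral px py radius → Spec_update_fog_of_war_ephemeral px py radius (update_fog_of_war_ephemeral px py radius)

-- ===== LEMMAS AND PROOFS =====

-- proof-only cell accessor (out-of-range reads default to false)
def pvCell (g : List (List Bool)) (y x : Nat) : Bool := ((g[y]?.getD [])[x]?).getD false

-- shape of a grid: row-length profile
def pvShape (g : List (List Bool)) : Prop := g.map List.length = List.replicate 27 48

theorem pvShape_modify (g : List (List Bool)) (i j : Nat) (h : pvShape g) :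
    pvShape (g.modify i (fun row => row.set j true)) := by
  unfold pvShape at *
  rw [← h]
  clear h
  induction g generalizing i with
  | nil => simp
  | cons r t ih =>
      cases i with
      | zero => simp [List.modify]
      | succ n => simpa [List.modify] using ih n

theorem pvCell_modify (g : List (List Bool)) (i j : Nat) (y x : Nat)
    (hg : pvShape g) (hy : y < 27) (hx : x < 48) :
    pvCell (g.modify i (fun row => row.set j true)) y x =
      (pvCell g y x || decide (y = i ∧ x = j)) := by
  have hlen : g.length = 27 := by simpa using congrArg List.length hg
  have hrow : ∀ (r : List Bool), r ∈ g → r.length = 48 := by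
    intro r hr
    have hmem : r.length ∈ g.map List.length := List.mem_map_of_mem hr
    rw [hg] at hmem
    exact List.eq_of_mem_replicate hmem
  have hyg : y < g.length := by omega
  have hrl : (g[y]'hyg).length = 48 := hrow _ (List.getElem_mem _)
  unfold pvCell
  rw [List.getElem?_modify, List.getElem?_eq_getElem hyg]
  simp only [Option.map_eq_map, Option.map_some, Option.getD_some]
  split_ifs with hiy
  · rw [List.getElem?_set]
    split_ifs with hjx hlt
    · have : y = i ∧ x = j := ⟨hiy.symm, hjx.symm⟩
      simp [this]
    · exact absurd (by omega : j < (g[y]'hyg).length) hlt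
    · have : ¬ (y = i ∧ x = j) := fun h => hjx h.2.symm
      simp [this]
  · have : ¬ (y = i ∧ x = j) := fun h => hiy h.1.symm
    simp [this]

theorem pvMark_shape (tx ty radius yy xx : Int) (g : List (List Bool)) (hg : pvShape g) :
    pvShape (pvMark tx ty radius yy g xx) := by
  unfold pvMark
  split_ifs with h1 h2
  · exact pvShape_modify g _ _ hg
  · exact hg
  · exact hg

theorem pvMark_cell (tx ty radius yy xx : Int) (g : List (List Bool)) (y x : Nat)
    (hg : pvShape g) (hy : y < 27) (hx : x < 48) :
    pvCell (pvMark tx ty radius yy g xx) y x =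
      (pvCell g y x ||
        decide ((y : Int) = yy ∧ (x : Int) = xx ∧
          ((x : Int) - tx) ^ 2 + ((y : Int) - ty) ^ 2 ≤ radius ^ 2)) := by
  unfold pvMark
  split_ifs with h1 h2
  · obtain ⟨hx0, hx48, hy0, hy27⟩ := h1
    rw [pvCell_modify g yy.toNat xx.toNat y x hg hy hx]
    congr 1
    rw [decide_eq_decide]
    constructor
    · rintro ⟨h3, h4⟩
      refine ⟨by omega, by omega, ?_⟩
      have e1 : (x : Int) = xx := by omega
      have e2 : (y : Int) = yy := by omega
      rw [e1, e2]; exact h2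
    · rintro ⟨h3, h4, -⟩
      constructor <;> omega
  · obtain ⟨hx0, hx48, hy0, hy27⟩ := h1
    have : ¬ ((y : Int) = yy ∧ (x : Int) = xx ∧
        ((x : Int) - tx) ^ 2 + ((y : Int) - ty) ^ 2 ≤ radius ^ 2) := by
      rintro ⟨h3, h4, h5⟩
      rw [← h3, ← h4] at h2
      exact h2 h5
    simp [this]
  · have : ¬ ((y : Int) = yy ∧ (x : Int) = xx ∧
        ((x : Int) - tx) ^ 2 + ((y : Int) - ty) ^ 2 ≤ radius ^ 2) := by
      rintro ⟨h3, h4, -⟩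
      rw [← h3, ← h4] at h1
      exact h1 ⟨by omega, by omega, by omega, by omega⟩
    simp [this]

theorem pvInner_shape (tx ty radius yy : Int) (xs : List Int) (g : List (List Bool))
    (hg : pvShape g) : pvShape (xs.foldl (pvMark tx ty radius yy) g) := by
  induction xs generalizing g with
  | nil => exact hg
  | cons xx t ih => exact ih _ (pvMark_shape tx ty radius yy xx g hg)

theorem pvInner_cell (tx ty radius yy : Int) (xs : List Int) (g : List (List Bool))
    (y x : Nat) (hg : pvShape g) (hy : y < 27) (hx : x < 48) :
    pvCell (xs.foldl (pvMark tx ty radius yy) g) y x =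
      (pvCell g y x ||
        decide ((y : Int) = yy ∧ (x : Int) ∈ xs ∧
          ((x : Int) - tx) ^ 2 + ((y : Int) - ty) ^ 2 ≤ radius ^ 2)) := by
  induction xs generalizing g with
  | nil => simp
  | cons xx t ih =>
      simp only [List.foldl_cons]
      rw [ih _ (pvMark_shape tx ty radius yy xx g hg)]
      rw [pvMark_cell tx ty radius yy xx g y x hg hy hx]
      rw [Bool.or_assoc, ← Bool.decide_or]
      congr 1
      rw [decide_eq_decide]
      simp only [List.mem_cons]
      tauto

theorem pvOuter_cell (tx ty radius : Int) (ys xs : List Int) (g : List (List Bool))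
    (y x : Nat) (hg : pvShape g) (hy : y < 27) (hx : x < 48) :
    pvCell (ys.foldl (fun g yy => xs.foldl (pvMark tx ty radius yy) g) g) y x =
      (pvCell g y x ||
        decide ((y : Int) ∈ ys ∧ (x : Int) ∈ xs ∧
          ((x : Int) - tx) ^ 2 + ((y : Int) - ty) ^ 2 ≤ radius ^ 2)) := by
  induction ys generalizing g with
  | nil => simp
  | cons yy t ih =>
      simp only [List.foldl_cons]
      rw [ih _ (pvInner_shape tx ty radius yy xs g hg)]
      rw [pvInner_cell tx ty radius yy xs g y x hg hy hx]
      rw [Bool.or_assoc, ← Bool.decide_or]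
      congr 1
      rw [decide_eq_decide]
      simp only [List.mem_cons]
      tauto

theorem pvShape_init : pvShape ((List.range 27).map (fun _ => (List.range 48).map (fun _ => false))) := by
  unfold pvShape
  simp [List.map_const']

theorem pvCell_init (y x : Nat) :
    pvCell ((List.range 27).map (fun _ => (List.range 48).map (fun _ => false))) y x = false := by
  unfold pvCell
  simp only [List.map_const', List.length_range, List.getElem?_replicate]
  split_ifs with hy
  · simp only [Option.getD_some, List.getElem?_replicate]
    split_ifs <;> rfl
  · rfl

theorem pvShape_alt (px py radius : Int) (hr : ¬ radius < 0) :
    pvShape (update_fog_of_war_ephemeral_alt px py radius) := by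
  unfold pvShape update_fog_of_war_ephemeral_alt
  rw [if_neg hr]
  simp only [List.map_map]
  apply List.eq_replicate_iff.mpr
  constructor
  · simp [PySem.List.length_pyRange_one]
  · intro b hb
    simp only [List.mem_map] at hb
    obtain ⟨a, _, rfl⟩ := hb
    simp [PySem.List.length_pyRange_one]

theorem pvCell_alt (px py radius : Int) (hr : ¬ radius < 0) (y x : Nat) (hy : y < 27) (hx : x < 48) :
    pvCell (update_fog_of_war_ephemeral_alt px py radius) y x =
      decide (((x : Int) - PySem.Int.floordiv px 32) ^ 2 +
              ((y : Int) - PySem.Int.floordiv py 32) ^ 2 ≤ radius * radius) := by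
  unfold pvCell update_fog_of_war_ephemeral_alt
  rw [if_neg hr]
  have h27 : y < (PySem.List.pyRange 0 27 1).length := by
    rw [PySem.List.length_pyRange_one]; omega
  have h48 : x < (PySem.List.pyRange 0 48 1).length := by
    rw [PySem.List.length_pyRange_one]; omega
  rw [List.getElem?_map, List.getElem?_eq_getElem h27]
  simp only [Option.map_some, Option.getD_some]
  rw [List.getElem?_map, List.getElem?_eq_getElem h48]
  simp only [Option.map_some, Option.getD_some]
  rw [PySem.List.getElem_pyRange_one, PySem.List.getElem_pyRange_one]
  norm_num

theorem pvGrid_ext (g h : List (List Bool)) (hg : pvShape g) (hh : pvShape h)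
    (hc : ∀ y x : Nat, y < 27 → x < 48 → pvCell g y x = pvCell h y x) : g = h := by
  have hgl : g.length = 27 := by have := congrArg List.length hg; simpa using this
  have hhl : h.length = 27 := by have := congrArg List.length hh; simpa using this
  have hrow : ∀ (g' : List (List Bool)), pvShape g' → ∀ i (hi : i < g'.length), (g'[i]).length = 48 := by
    intro g' hg' i hi
    have hmem : g'[i] ∈ g' := List.getElem_mem _
    have : (g'[i]).length ∈ g'.map List.length := List.mem_map_of_mem hmem
    rw [hg'] at this
    exact List.eq_of_mem_replicate this
  apply List.ext_getElem (by omega)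
  intro i hi1 hi2
  apply List.ext_getElem (by rw [hrow g hg i hi1, hrow h hh i hi2])
  intro j hj1 hj2
  have hi27 : i < 27 := by omega
  have hj48 : j < 48 := by rw [hrow g hg i hi1] at hj1; omega
  have := hc i j hi27 hj48
  unfold pvCell at this
  rw [List.getElem?_eq_getElem hi1, List.getElem?_eq_getElem hi2] at this
  simp only [Option.getD_some] at this
  rw [List.getElem?_eq_getElem hj1, List.getElem?_eq_getElem hj2] at this
  simpa using this

theorem pvOuter_shape (tx ty radius : Int) (ys xs : List Int) (g : List (List Bool))
    (hg : pvShape g) :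
    pvShape (ys.foldl (fun g yy => xs.foldl (pvMark tx ty radius yy) g) g) := by
  induction ys generalizing g with
  | nil => exact hg
  | cons yy t ih => exact ih _ (pvInner_shape tx ty radius yy xs g hg)

-- ===== VERDICT (by name: the statement is the Claim_ definition above) =====
theorem update_fog_of_war_ephemeral_spec : Claim_equal_update_fog_of_war_ephemeral := by
  intro px py radius _
  unfold Spec_update_fog_of_war_ephemeral
  by_cases hr : radius < 0
  · simp only [update_fog_of_war_ephemeral, update_fog_of_war_ephemeral_alt, if_pos hr]
    rw [PySem.List.pyRange_one_eq_nil (by omega)]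
    simp [List.map_const']
  · simp only [update_fog_of_war_ephemeral]
    apply pvGrid_ext
    · exact pvOuter_shape _ _ _ _ _ _ pvShape_init
    · exact pvShape_alt px py radius hr
    · intro y x hy hx
      rw [pvOuter_cell _ _ _ _ _ _ y x pvShape_init hy hx]
      rw [pvCell_init, Bool.false_or]
      rw [pvCell_alt px py radius hr y x hy hx]
      rw [show radius * radius = radius ^ 2 by ring]
      rw [decide_eq_decide]
      simp only [PySem.List.mem_pyRange_one]
      have hr' : (0 : Int) ≤ radius := by omega
      constructor
      · rintro ⟨_, _, hc⟩; exact hc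
      · intro hc
        refine ⟨⟨?_, ?_⟩, ⟨?_, ?_⟩, hc⟩
        · nlinarith [sq_nonneg ((x : Int) - PySem.Int.floordiv px 32),
            sq_nonneg ((y : Int) - PySem.Int.floordiv py 32 + radius)]
        · nlinarith [sq_nonneg ((x : Int) - PySem.Int.floordiv px 32),
            sq_nonneg ((y : Int) - PySem.Int.floordiv py 32 - radius)]
        · nlinarith [sq_nonneg ((y : Int) - PySem.Int.floordiv py 32),
            sq_nonneg ((x : Int) - PySem.Int.floordiv px 32 + radius)]
        · nlinarith [sq_nonneg ((y : Int) - PySem.Int.floordiv py 32),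
            sq_nonneg ((x : Int) - PySem.Int.floordiv px 32 - radius)]
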